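-- pv_equiv track=rewrite | github.com/cutehammond772/problem-solving-archive | 백준/Gold/2084. 차수열/차수열.py | solve
-- ===== SOURCE A (Python) =====
-- from heapq import heappush, heappop, heapify
--
-- def solve(N, D):
-- 	# Case 1. 차수의 합은 항상 짝수여야 한다.
-- 	if sum(D) % 1:
-- 		return [[-1]]
--
-- 	# Case 2. 간선의 최대 개수는 COMB(N, 2)이다.
-- 	if N * (N - 1) < sum(D):
-- 		return [[-1]]
--
-- 	# Case 3.
-- 	matrix = [[0] * N for _ in range(N)]
-- 	heap = [(-D[i], i) for i in range(N)]
-- 	heapify(heap)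
--
-- 	while heap:
-- 		last, p = heappop(heap)
-- 		last *= -1
-- 		candidates = []
--
-- 		while last and heap:
-- 			another, q = heappop(heap)
-- 			last -= 1
--
-- 			if another + 1:
-- 				candidates.append((another + 1, q))
--
-- 			matrix[p][q] = matrix[q][p] = 1
--
-- 		if last:
-- 			return [[-1]]
--
-- 		while candidates:
-- 			heappush(heap, candidates.pop())
--
-- 	return matrix
-- ===== SOURCE B (Python) =====
-- def solve(N, D):
--     # Same return value as the heapq version; like it, D is not mutated.
--     if N * (N - 1) < sum(D):
--         return [[-1]]
--     n = N if N > 0 else 0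
--     deg = list(D[:n])
--     # stable sort: equal degrees keep ascending index order, i.e. (degree desc, index asc)
--     order = sorted(range(n), key=lambda i: -deg[i])
--     matrix = [[0] * n for _ in range(n)]
--     while order:
--         p, rest = order[0], order[1:]
--         need = deg[p]
--         if need < 0 or need > len(rest) or (need > 0 and deg[rest[need - 1]] < 1):
--             return [[-1]]
--         for q in rest[:need]:
--             matrix[p][q] = matrix[q][p] = 1
--         for q in rest[:need]:
--             deg[q] -= 1
--         a = [q for q in rest[:need] if deg[q] > 0]
--         b = rest[need:]
--         merged, i, j = [], 0, 0
--         while i < len(a) and j < len(b):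
--             if (-deg[a[i]], a[i]) <= (-deg[b[j]], b[j]):
--                 merged.append(a[i]); i += 1
--             else:
--                 merged.append(b[j]); j += 1
--         order = merged + a[i:] + b[j:]
--     return matrix
-- ===== Notes on version B (the rewrite author's own statement) =====
-- stated objective: alternative
-- what changed: Replaces the heapq priority queue (pop/push with re-sifting every round) by one initial stable sort by descending degree plus a linear two-way merge of the decremented block per round, the classical O(N^2) Havel-Hakimi; infeasible selections are rejected immediately instead of after reinserting negative residual degrees.
import Mathlib
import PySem

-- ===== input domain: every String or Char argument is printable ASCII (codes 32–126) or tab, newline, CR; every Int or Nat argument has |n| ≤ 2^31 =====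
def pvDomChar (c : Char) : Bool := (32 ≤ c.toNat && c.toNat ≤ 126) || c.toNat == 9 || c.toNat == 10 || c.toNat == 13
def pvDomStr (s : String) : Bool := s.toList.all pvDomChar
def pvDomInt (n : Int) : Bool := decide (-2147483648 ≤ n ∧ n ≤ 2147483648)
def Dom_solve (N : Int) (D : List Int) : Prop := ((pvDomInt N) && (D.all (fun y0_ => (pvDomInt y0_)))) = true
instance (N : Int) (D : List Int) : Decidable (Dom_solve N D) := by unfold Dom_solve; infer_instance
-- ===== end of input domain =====

-- B replaces the heapq priority queue by one initial stable sort by descending degree plus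
-- a two-way merge of the decremented block per round (classical Havel–Hakimi): a different
-- algorithm of similar cost; return values proved identical on Pre_solve.

-- ===== PORT A =====

-- Python tuple comparison (a1, a2) <= (b1, b2), used by heapq on its (−degree, index) pairs
-- and by B's merge; exact lexicographic order.
def pvLeb (a b : Int × Int) : Bool := a.1 < b.1 || (a.1 == b.1 && a.2 ≤ b.2)

-- `row[j] = v`; exact for 0 ≤ j < row.length, the only indices this program uses.
def pvSetRow (row : List Int) (j v : Int) : List Int := row.set j.toNat v

-- `m[i][j] = v`; exact for 0 ≤ i, j < m.length, the only indices this program uses.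
def pvSet2 (m : List (List Int)) (i j v : Int) : List (List Int) :=
  m.set i.toNat (pvSetRow (m.getD i.toNat []) j v)

-- heapq model: the heap is kept as a lexicographically sorted list, heappush = ordered
-- insert, heappop = take the head.  Exact for this program: the heap's pairs always have
-- pairwise distinct second components, so heappop's RESULT is the unique minimum of the
-- heap's multiset — which this model returns — and only the multiset of elements (never
-- heapq's internal array layout) influences anything A computes.
def pvPush (x : Int × Int) : List (Int × Int) → List (Int × Int)
  | [] => [x]
  | y :: ys => if pvLeb x y then x :: y :: ys else y :: pvPush x ys

def pvHeapify (l : List (Int × Int)) : List (Int × Int) := l.foldr pvPush []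

theorem pvPush_length (x : Int × Int) (l : List (Int × Int)) :
    (pvPush x l).length = l.length + 1 := by
  induction l with
  | nil => rfl
  | cons y ys ih => simp only [pvPush]; split <;> simp [ih]

theorem pvFoldrPush_length (c h : List (Int × Int)) :
    (c.foldr pvPush h).length = c.length + h.length := by
  induction c with
  | nil => simp
  | cons x xs ih => simp [List.foldr, pvPush_length, ih]; omega

-- the inner `while last and heap:` loop of A; returns (last, heap, candidates, matrix)
def pvInner (p : Int) (last : Int) (heap cand : List (Int × Int)) (mat : List (List Int)) :
    Int × List (Int × Int) × List (Int × Int) × List (List Int) :=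
  match heap with
  | [] => (last, [], cand, mat)
  | (another, q) :: hs =>
    if last = 0 then (last, (another, q) :: hs, cand, mat)
    else
      pvInner p (last - 1) hs
        (if another + 1 ≠ 0 then cand ++ [(another + 1, q)] else cand)
        (pvSet2 (pvSet2 mat p q 1) q p 1)

theorem pvInner_length (p last : Int) (heap cand : List (Int × Int)) (mat : List (List Int)) :
    (pvInner p last heap cand mat).2.1.length + (pvInner p last heap cand mat).2.2.1.length
      ≤ heap.length + cand.length := by
  induction heap generalizing last cand mat with
  | nil => simp [pvInner]
  | cons x hs ih =>
    obtain ⟨another, q⟩ := x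
    simp only [pvInner]
    split
    · simp
    · refine le_trans (ih _ _ _) ?_
      split <;> simp <;> omega

-- the outer `while heap:` loop of A
def pvOuter (heap : List (Int × Int)) (mat : List (List Int)) : List (List Int) :=
  match heap with
  | [] => mat
  | (nl, p) :: hs =>
    let r := pvInner p (-nl) hs [] mat
    if r.1 ≠ 0 then [[-1]]
    else pvOuter (r.2.2.1.foldr pvPush r.2.1) r.2.2.2
termination_by heap.length
decreasing_by
  have h := pvInner_length p (-nl) hs [] mat
  simp only [List.length_nil, Nat.add_zero] at h
  simp only [pvFoldrPush_length, List.length_cons]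
  omega

def solve (N : Int) (D : List Int) : List (List Int) :=
  -- `sum(D) % 1` (Python `%`, always 0 — transliterated as written)
  if PySem.Int.mod D.sum 1 ≠ 0 then [[-1]]
  else if N * (N - 1) < D.sum then [[-1]]
  else
    -- [[0]*N for _ in range(N)]: empty for N ≤ 0, exactly replicate N.toNat
    let mat := List.replicate N.toNat (List.replicate N.toNat 0)
    -- D[i]: exact under Pre_solve (0 ≤ i < N ≤ len D)
    let heap := pvHeapify ((PySem.List.pyRange 0 N 1).map (fun i => (-(PySem.List.pyGetD D i 0), i)))
    pvOuter heap mat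

-- ===== PORT B =====

-- (−deg[i], i), the comparison key B's merge uses
def pvKey (deg : List Int) (i : Int) : Int × Int := (-(PySem.List.pyGetD deg i 0), i)

-- the hand-written two-way merge loop of Source B (result: merged + a[i:] + b[j:])
def pvMerge (deg : List Int) : List Int → List Int → List Int
  | [], ys => ys
  | x :: xs, [] => x :: xs
  | x :: xs, y :: ys =>
    if pvLeb (pvKey deg x) (pvKey deg y)
    then x :: pvMerge deg xs (y :: ys)
    else y :: pvMerge deg (x :: xs) ys
termination_by xs ys => xs.length + ys.length

theorem pvMerge_length (deg : List Int) (a b : List Int) :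
    (pvMerge deg a b).length = a.length + b.length := by
  fun_induction pvMerge deg a b with
  | case1 => simp
  | case2 => simp
  | case3 x xs y ys h ih => simp [ih]; omega
  | case4 x xs y ys h ih => simp [ih]; omega

-- the `while order:` loop of Source B
def pvLoopB (order deg : List Int) (mat : List (List Int)) : List (List Int) :=
  match order with
  | [] => mat
  | p :: rest =>
    let need := PySem.List.pyGetD deg p 0
    if need < 0 ∨ (rest.length : Int) < need ∨
        (0 < need ∧ PySem.List.pyGetD deg (PySem.List.pyGetD rest (need - 1) 0) 0 < 1) then
      [[-1]]
    else
      let chosen := rest.take need.toNat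
      let mat' := chosen.foldl (fun m q => pvSet2 (pvSet2 m p q 1) q p 1) mat
      let deg' := chosen.foldl (fun d q => pvSetRow d q (PySem.List.pyGetD d q 0 - 1)) deg
      let a := chosen.filter (fun q => 0 < PySem.List.pyGetD deg' q 0)
      pvLoopB (pvMerge deg' a (rest.drop need.toNat)) deg' mat'
termination_by order.length
decreasing_by
  simp only [pvMerge_length, List.length_cons, List.length_drop]
  have := List.length_filter_le (fun q => decide (0 < PySem.List.pyGetD
      (List.foldl (fun d q => pvSetRow d q (PySem.List.pyGetD d q 0 - 1)) deg
        (rest.take (PySem.List.pyGetD deg p 0).toNat)) q 0))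
      (rest.take (PySem.List.pyGetD deg p 0).toNat)
  simp only [List.length_take] at this
  omega

def solve_alt (N : Int) (D : List Int) : List (List Int) :=
  if N * (N - 1) < D.sum then [[-1]]
  else
    let n := if 0 < N then N else 0
    let deg := D.take n.toNat
    -- sorted(range(n), key=lambda i: -deg[i]): stable, so ties keep ascending index order
    let order := PySem.List.sorted (PySem.List.pyRange 0 n 1) (fun i => -(PySem.List.pyGetD deg i 0)) false
    let mat := List.replicate n.toNat (List.replicate n.toNat 0)
    pvLoopB order deg mat

-- ===== PRECONDITION & SPEC =====
-- Pre_ excludes exactly the inputs with len(D) < N on which A reaches D[i] and raises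
-- IndexError; when the edge-count check already answers (N*(N-1) < sum(D)), A returns
-- [[-1]] before indexing, and those inputs stay inside Pre_.
def Pre_solve (N : Int) (D : List Int) : Prop :=
  N ≤ (D.length : Int) ∨ N * (N - 1) < D.sum
instance (N : Int) (D : List Int) : Decidable (Pre_solve N D) := by unfold Pre_solve; infer_instance
def pvWitness_solve : Int × List Int := (4, [2, 2, 1, 1])

def Spec_solve (N : Int) (D : List Int) (out : List (List Int)) : Prop := out = solve_alt N D
instance (N : Int) (D : List Int) (out : List (List Int)) : Decidable (Spec_solve N D out) := by unfold Spec_solve; infer_instance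

-- ===== CLAIM (what is proved, stated in full; the proofs are below) =====
def Claim_equal_solve : Prop := ∀ (N : Int) (D : List Int), Dom_solve N D → Pre_solve N D → Spec_solve N D (solve N D)

-- ===== LEMMAS AND PROOFS =====

-- lexicographic ≤ on pairs, the Prop shadow of pvLeb
def pvLe (a b : Int × Int) : Prop := a.1 < b.1 ∨ (a.1 = b.1 ∧ a.2 ≤ b.2)

theorem pvLeb_iff (a b : Int × Int) : pvLeb a b = true ↔ pvLe a b := by
  simp [pvLeb, pvLe]

theorem pvLe_total (a b : Int × Int) : pvLe a b ∨ pvLe b a := by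
  unfold pvLe; omega

theorem pvLe_antisymm {a b : Int × Int} (h1 : pvLe a b) (h2 : pvLe b a) : a = b := by
  obtain ⟨a1, a2⟩ := a; obtain ⟨b1, b2⟩ := b
  simp [pvLe] at h1 h2 ⊢; omega

theorem pvLe_trans {a b c : Int × Int} (h1 : pvLe a b) (h2 : pvLe b c) : pvLe a c := by
  unfold pvLe at *; omega

theorem pvPush_perm (x : Int × Int) (l : List (Int × Int)) : (pvPush x l).Perm (x :: l) := by
  induction l with
  | nil => simp [pvPush]
  | cons y ys ih =>
    simp only [pvPush]
    split
    · exact List.Perm.refl _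
    · exact (ih.cons y).trans (List.Perm.swap x y ys)

theorem pvPush_sorted {x : Int × Int} {l : List (Int × Int)}
    (h : l.Pairwise pvLe) : (pvPush x l).Pairwise pvLe := by
  induction l with
  | nil => simp [pvPush]
  | cons y ys ih =>
    simp only [pvPush]
    rcases List.pairwise_cons.mp h with ⟨hy, hys⟩
    split
    · rename_i hle
      refine List.pairwise_cons.mpr ⟨?_, h⟩
      intro z hz
      rcases List.mem_cons.mp hz with hz | hz
      · subst hz; exact (pvLeb_iff _ _).mp hle
      · exact pvLe_trans ((pvLeb_iff _ _).mp hle) (hy z hz)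
    · rename_i hnle
      have hyx : pvLe y x := by
        rcases pvLe_total x y with h1 | h1
        · exact absurd ((pvLeb_iff x y).mpr h1) (by simpa using hnle)
        · exact h1
      refine List.pairwise_cons.mpr ⟨?_, ih hys⟩
      intro z hz
      have := (pvPush_perm x ys).mem_iff (a := z)
      rw [this] at hz
      rcases List.mem_cons.mp hz with hz | hz
      · subst hz; exact hyx
      · exact hy z hz

theorem pvFoldrPush_perm (c h : List (Int × Int)) : (c.foldr pvPush h).Perm (c ++ h) := by
  induction c with
  | nil => simp
  | cons x xs ih =>
    simp only [List.foldr, List.cons_append]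
    exact (pvPush_perm x _).trans (ih.cons x)

theorem pvFoldrPush_sorted {c h : List (Int × Int)} (hs : h.Pairwise pvLe) :
    (c.foldr pvPush h).Pairwise pvLe := by
  induction c with
  | nil => simpa
  | cons x xs ih => exact pvPush_sorted ih

theorem pvFoldrPush_mem {z : Int × Int} {c h : List (Int × Int)} (hz : z ∈ c ∨ z ∈ h) :
    z ∈ c.foldr pvPush h := by
  have := (pvFoldrPush_perm c h).mem_iff (a := z)
  simp [this]; tauto

-- characterisation of the inner loop when 0 ≤ last ≤ len heap (the non-failing shape)
theorem pvInner_spec (p : Int) (last : Int) (heap cand : List (Int × Int))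
    (mat : List (List Int)) (h0 : 0 ≤ last) (hlen : last ≤ (heap.length : Int)) :
    pvInner p last heap cand mat =
      (0, heap.drop last.toNat,
       cand ++ (heap.take last.toNat).filterMap
         (fun x => if x.1 + 1 ≠ 0 then some (x.1 + 1, x.2) else none),
       (heap.take last.toNat).foldl (fun m x => pvSet2 (pvSet2 m p x.2 1) x.2 p 1) mat) := by
  induction heap generalizing last cand mat with
  | nil =>
    have : last = 0 := by simpa using le_antisymm hlen h0
    subst this
    simp [pvInner]
  | cons x hs ih =>
    obtain ⟨a, q⟩ := x
    simp only [pvInner]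
    by_cases h : last = 0
    · subst h; simp
    · have h1 : 0 ≤ last - 1 := by omega
      have h2 : last - 1 ≤ (hs.length : Int) := by simp at hlen; omega
      have h3 : last.toNat = (last - 1).toNat + 1 := by omega
      rw [if_neg h, ih _ _ _ h1 h2, h3]
      simp only [List.take_succ_cons, List.drop_succ_cons, List.filterMap_cons, List.foldl_cons]
      split <;> simp

-- the inner loop with last < 0 or last > len heap drains the heap
theorem pvInner_drain (p : Int) (last : Int) (heap cand : List (Int × Int))
    (mat : List (List Int)) (h : last < 0 ∨ (heap.length : Int) < last) :
    (pvInner p last heap cand mat).1 = last - heap.length := by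
  induction heap generalizing last cand mat with
  | nil => simp [pvInner]
  | cons x hs ih =>
    obtain ⟨a, q⟩ := x
    simp only [pvInner]
    have hne : ¬ last = 0 := by simp at h; omega
    rw [if_neg hne]
    have := ih (last - 1) (if a + 1 ≠ 0 then cand ++ [(a + 1, q)] else cand)
      (pvSet2 (pvSet2 mat p q 1) q p 1) (by simp at h ⊢; omega)
    rw [this]
    simp; omega

-- once the heap holds a pair with positive first component (a vertex of negative residual
-- degree), A's outer loop can only end in the [[-1]] branch
theorem pvOuter_fail (heap : List (Int × Int)) (mat : List (List Int))
    (h : ∃ x ∈ heap, 1 ≤ x.1) : pvOuter heap mat = [[-1]] := by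
  induction hn : heap.length using Nat.strong_induction_on generalizing heap mat with
  | _ n ih =>
  subst hn
  match heap, h with
  | (nl, p) :: hs, h =>
  rw [pvOuter]
  by_cases hnl : 1 ≤ nl
  · rw [pvInner_drain p (-nl) hs [] mat (by left; omega)]
    rw [if_pos (by simp; omega)]
  · obtain ⟨x, hx, hx1⟩ := h
    have hxhs : x ∈ hs := by
      rcases List.mem_cons.mp hx with h' | h'
      · exfalso; rw [h'] at hx1; simp at hx1; omega
      · exact h'
    by_cases hlen : (hs.length : Int) < -nl
    · rw [pvInner_drain p (-nl) hs [] mat (Or.inr hlen)]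
      rw [if_pos (by simp; omega)]
    · have hlen' : -nl ≤ (hs.length : Int) := by omega
      rw [pvInner_spec p (-nl) hs [] mat (by omega) hlen']
      rw [if_neg (show ¬ ((0 : Int) ≠ 0) by simp), List.nil_append]
      set k := (-nl).toNat with hk
      set cand := (hs.take k).filterMap
        (fun x => if x.1 + 1 ≠ 0 then some (x.1 + 1, x.2) else none) with hcand
      have hxsplit : x ∈ hs.take k ++ hs.drop k := by rw [List.take_append_drop]; exact hxhs
      have hmem : ∃ y ∈ cand.foldr pvPush (hs.drop k), 1 ≤ y.1 := by
        rcases List.mem_append.mp hxsplit with h' | h'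
        · refine ⟨(x.1 + 1, x.2), pvFoldrPush_mem (Or.inl ?_), by simp; omega⟩
          rw [hcand]
          exact List.mem_filterMap.mpr ⟨x, h', by rw [if_pos (by omega)]⟩
        · exact ⟨x, pvFoldrPush_mem (Or.inr h'), hx1⟩
      refine ih (cand.foldr pvPush (hs.drop k)).length ?_ _ _ hmem rfl
      have h1 : cand.length ≤ (hs.take k).length := by
        rw [hcand]; exact List.length_filterMap_le _ _
      have h2 := List.length_take_le k hs
      have h3 : (hs.take k).length + (hs.drop k).length = hs.length := by
        rw [← List.length_append, List.take_append_drop]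
      rw [pvFoldrPush_length]
      simp only [List.length_cons]
      omega

-- stable sort by a single Int key over a strictly increasing list is sorted by (key, id)
theorem pvSorted_pairwise_lex (k : Int → Int) (xs : List Int) (h : xs.Pairwise (· < ·)) :
    (PySem.List.sorted xs k false).Pairwise (fun a b => pvLe (k a, a) (k b, b)) := by
  rw [PySem.List.sorted_eq_foldl_insertBy]
  -- stability invariant: the accumulator is lex-sorted and all its elements precede
  -- (as indices) everything still to be inserted
  suffices H : ∀ (ys : List Int) (acc : List Int),
      acc.Pairwise (fun a b => pvLe (k a, a) (k b, b)) →
      (∀ a ∈ acc, ∀ b ∈ ys, a < b) → ys.Pairwise (· < ·) →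
      (ys.foldl (fun acc x => PySem.List.insertBy (fun a b => decide (k a < k b)) x acc) acc).Pairwise
        (fun a b => pvLe (k a, a) (k b, b)) by
    exact H xs [] (by simp) (by simp) h
  have step : ∀ (x : Int) (acc : List Int),
      acc.Pairwise (fun a b => pvLe (k a, a) (k b, b)) → (∀ a ∈ acc, a < x) →
      (PySem.List.insertBy (fun a b => decide (k a < k b)) x acc).Pairwise
        (fun a b => pvLe (k a, a) (k b, b)) := by
    intro x acc
    induction acc with
    | nil => intro _ _; simp [PySem.List.insertBy]
    | cons y ys ih =>
      intro h1 h2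
      rcases List.pairwise_cons.mp h1 with ⟨hy, hys⟩
      rw [PySem.List.insertBy]
      split
      · rename_i hlt
        simp only [decide_eq_true_eq] at hlt
        refine List.pairwise_cons.mpr ⟨?_, h1⟩
        intro z hz
        rcases List.mem_cons.mp hz with hz | hz
        · subst hz; exact Or.inl hlt
        · rcases hy z hz with h' | h'
          · exact Or.inl (lt_trans hlt h')
          · exact Or.inl (by omega)
      · rename_i hnlt
        simp only [decide_eq_true_eq] at hnlt
        refine List.pairwise_cons.mpr ⟨?_, ih hys (fun a ha => h2 a (List.mem_cons_of_mem y ha))⟩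
        intro z hz
        rcases (PySem.List.insertBy_mem_iff _ x z ys).mp hz with hz | hz
        · subst hz
          rcases lt_or_eq_of_le (le_of_not_gt hnlt) with h' | h'
          · exact Or.inl h'
          · exact Or.inr ⟨h', le_of_lt (h2 y (List.mem_cons_self))⟩
        · exact hy z hz
  intro ys
  induction ys with
  | nil => intro acc h1 _ _; simpa using h1
  | cons b bs ih =>
    intro acc h1 h2 h3
    rcases List.pairwise_cons.mp h3 with ⟨hb, hbs⟩
    simp only [List.foldl_cons]
    refine ih _ (step b acc h1 (fun a ha => h2 a ha b List.mem_cons_self)) ?_ hbs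
    intro a ha c hc
    rcases (PySem.List.insertBy_mem_iff _ b a acc).mp ha with ha | ha
    · subst ha; exact hb c hc
    · exact h2 a ha c (List.mem_cons_of_mem b hc)

-- effect of the degree-decrement fold on lookups
theorem pvSetRow_getD (d : List Int) (r v q : Int) (hr : 0 ≤ r) (hq : 0 ≤ q) :
    PySem.List.pyGetD (pvSetRow d r v) q 0
      = if q = r ∧ r < (d.length : Int) then v else PySem.List.pyGetD d q 0 := by
  rw [pvSetRow, PySem.List.pyGetD_of_nonneg _ _ hq, PySem.List.pyGetD_of_nonneg _ _ hq]
  rcases Decidable.em (q = r ∧ r < (d.length : Int)) with h | h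
  · rw [if_pos h]
    obtain ⟨rfl, hlt⟩ := h
    have : q.toNat < d.length := by omega
    simp [List.getD, this]
  · rw [if_neg h]
    by_cases hqr : q = r
    · subst hqr
      have : d.length ≤ q.toNat := by omega
      simp [List.getD, List.set_eq_of_length_le this]
    · have hne : r.toNat ≠ q.toNat := by omega
      simp [List.getD, List.getElem?_set_ne hne]

theorem pvDecFold_length (deg : List Int) (chosen : List Int) :
    (chosen.foldl (fun d r => pvSetRow d r (PySem.List.pyGetD d r 0 - 1)) deg).length
      = deg.length := by
  induction chosen generalizing deg with
  | nil => rfl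
  | cons c cs ih => simp only [List.foldl_cons]; rw [ih]; simp [pvSetRow]

theorem pvDecFold_getD (deg : List Int) (chosen : List Int) (q : Int)
    (hnd : chosen.Nodup) (hb : ∀ r ∈ chosen, 0 ≤ r) (hq : 0 ≤ q) :
    PySem.List.pyGetD (chosen.foldl (fun d r => pvSetRow d r (PySem.List.pyGetD d r 0 - 1)) deg) q 0
      = if q ∈ chosen ∧ q < (deg.length : Int) then PySem.List.pyGetD deg q 0 - 1
        else PySem.List.pyGetD deg q 0 := by
  induction chosen generalizing deg with
  | nil => simp
  | cons c cs ih =>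
    simp only [List.foldl_cons]
    rcases List.nodup_cons.mp hnd with ⟨hc, hcs⟩
    have hc0 : 0 ≤ c := hb c List.mem_cons_self
    have hlen : ((pvSetRow deg c (PySem.List.pyGetD deg c 0 - 1)).length : Int)
        = (deg.length : Int) := by simp [pvSetRow]
    rw [ih _ hcs (fun r hr => hb r (List.mem_cons_of_mem c hr)), hlen,
        pvSetRow_getD deg c _ q hc0 hq]
    simp only [List.mem_cons]
    by_cases hqc : q = c
    · subst hqc
      by_cases hql : q < (deg.length : Int) <;> simp [hc, hql]
    · by_cases hqcs : q ∈ cs <;> by_cases hql : q < (deg.length : Int) <;>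
        simp [hqc, hqcs, hql]

theorem pvMerge_perm (deg : List Int) (a b : List Int) :
    (pvMerge deg a b).Perm (a ++ b) := by
  fun_induction pvMerge deg a b with
  | case1 => simp
  | case2 => simp
  | case3 x xs y ys h ih => simpa using ih.cons x
  | case4 x xs y ys h ih =>
    refine ((ih.cons y).trans ?_)
    simpa using (List.perm_middle (a := y) (l₁ := x :: xs) (l₂ := ys)).symm

theorem pvMerge_map_sorted (deg : List Int) (a b : List Int)
    (ha : (a.map (pvKey deg)).Pairwise pvLe) (hb : (b.map (pvKey deg)).Pairwise pvLe) :
    ((pvMerge deg a b).map (pvKey deg)).Pairwise pvLe := by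
  fun_induction pvMerge deg a b with
  | case1 => exact hb
  | case2 => exact ha
  | case3 x xs y ys h ih =>
    rcases List.pairwise_cons.mp ha with ⟨hx, hxs⟩
    simp only [List.map_cons]
    refine List.pairwise_cons.mpr ⟨?_, ih hxs hb⟩
    intro z hz
    have hmem := ((pvMerge_perm deg xs (y :: ys)).map (pvKey deg)).mem_iff (a := z)
    rw [hmem] at hz
    rcases List.mem_map.mp hz with ⟨w, hw, rfl⟩
    rcases List.mem_append.mp hw with hw | hw
    · exact hx _ (List.mem_map_of_mem hw)
    · rcases List.mem_cons.mp hw with hw | hw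
      · subst hw; exact (pvLeb_iff _ _).mp h
      · exact pvLe_trans ((pvLeb_iff _ _).mp h)
          ((List.pairwise_cons.mp hb).1 _ (List.mem_map_of_mem hw))
  | case4 x xs y ys h ih =>
    rcases List.pairwise_cons.mp hb with ⟨hy, hys⟩
    simp only [List.map_cons]
    have hyx : pvLe (pvKey deg y) (pvKey deg x) := by
      rcases pvLe_total (pvKey deg x) (pvKey deg y) with h1 | h1
      · exact absurd ((pvLeb_iff _ _).mpr h1) (by simpa using h)
      · exact h1
    refine List.pairwise_cons.mpr ⟨?_, ih ha hys⟩
    intro z hz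
    have hmem := ((pvMerge_perm deg (x :: xs) ys).map (pvKey deg)).mem_iff (a := z)
    rw [hmem] at hz
    rcases List.mem_map.mp hz with ⟨w, hw, rfl⟩
    rcases List.mem_append.mp hw with hw | hw
    · rcases List.mem_cons.mp hw with hw | hw
      · subst hw; exact hyx
      · exact pvLe_trans hyx ((List.pairwise_cons.mp ha).1 _ (List.mem_map_of_mem hw))
    · exact hy _ (List.mem_map_of_mem hw)

-- rest[need-1] (the last selected vertex) belongs to the selection …
theorem pvLast_mem (rest : List Int) (need : Int) (h0 : 0 < need)
    (hle : need ≤ (rest.length : Int)) :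
    PySem.List.pyGetD rest (need - 1) 0 ∈ rest.take need.toNat := by
  have hidx : (need - 1).toNat < rest.length := by omega
  rw [PySem.List.pyGetD_eq_getElem rest 0 (by omega) (by omega)]
  have hlt : (need - 1).toNat < (rest.take need.toNat).length := by
    rw [List.length_take]; omega
  have h := List.getElem_take (xs := rest) (j := need.toNat) (i := (need - 1).toNat) (h := hlt)
  rw [← h]
  exact List.getElem_mem hlt

-- … and has the least degree among the selected vertices
theorem pvTake_min (deg rest : List Int) (need : Int) (h0 : 0 < need)
    (hle : need ≤ (rest.length : Int))
    (hsort : (rest.map (pvKey deg)).Pairwise pvLe)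
    (q : Int) (hq : q ∈ rest.take need.toNat) :
    PySem.List.pyGetD deg (PySem.List.pyGetD rest (need - 1) 0) 0
      ≤ PySem.List.pyGetD deg q 0 := by
  have hidx : (need - 1).toNat < rest.length := by omega
  rw [PySem.List.pyGetD_eq_getElem rest 0 (by omega) (by omega)]
  obtain ⟨i, hi, hqi⟩ := List.getElem_of_mem hq
  have hik : i < need.toNat := by
    have h := hi; rw [List.length_take] at h; omega
  have hir : i < rest.length := by omega
  have hqr : q = rest[i] := by rw [← hqi, List.getElem_take]
  rcases Nat.lt_or_ge i (need - 1).toNat with hij | hij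
  · have hpw := List.pairwise_iff_getElem.mp hsort i (need - 1).toNat
      (by rw [List.length_map]; exact hir) (by rw [List.length_map]; exact hidx) hij
    simp only [List.getElem_map] at hpw
    have h1 : (pvKey deg rest[i]).1 ≤ (pvKey deg rest[(need - 1).toNat]).1 := by
      rcases hpw with h' | h'
      · exact le_of_lt h'
      · exact le_of_eq h'.1
    simp only [pvKey] at h1
    rw [hqr]; omega
  · have h2 : i = (need - 1).toNat := by omega
    subst h2
    rw [hqr]

-- the main invariant-carrying equivalence of the two loops
theorem pvMain (n : Nat) : ∀ (order deg : List Int) (mat : List (List Int)),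
    order.length = n →
    ((order.map (pvKey deg)).Pairwise pvLe) → order.Nodup →
    (∀ q ∈ order, 0 ≤ q ∧ q < (deg.length : Int)) →
    pvOuter (order.map (pvKey deg)) mat = pvLoopB order deg mat := by
  induction n using Nat.strong_induction_on with
  | _ n ih =>
  intro order deg mat hlen hsort hnd hbd
  cases order with
  | nil => rw [List.map_nil, pvOuter, pvLoopB]
  | cons p rest =>
  have hp0 : 0 ≤ p := (hbd p List.mem_cons_self).1
  set need := PySem.List.pyGetD deg p 0 with hneed
  have hhead : pvKey deg p = (-need, p) := rfl
  rw [pvLoopB, List.map_cons, hhead, pvOuter, neg_neg]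
  set hs := rest.map (pvKey deg) with hhs
  have hrest_sort : hs.Pairwise pvLe := by
    rw [List.map_cons, hhead] at hsort
    exact (List.pairwise_cons.mp hsort).2
  have hlenhs : hs.length = rest.length := by simp [hhs]
  by_cases hc1 : need < 0
  · rw [pvInner_drain p need hs [] mat (Or.inl hc1)]
    rw [if_pos (by rw [hlenhs]; omega), if_pos (Or.inl hc1)]
  · by_cases hc2 : (rest.length : Int) < need
    · rw [pvInner_drain p need hs [] mat (Or.inr (by rw [hlenhs]; exact_mod_cast hc2))]
      rw [if_pos (by rw [hlenhs]; omega), if_pos (Or.inr (Or.inl hc2))]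
    · have h0 : 0 ≤ need := by omega
      have hle : need ≤ (rest.length : Int) := by omega
      rw [pvInner_spec p need hs [] mat h0 (by rw [hlenhs]; exact hle)]
      rw [if_neg (show ¬ ((0 : Int) ≠ 0) by simp), List.nil_append]
      set chosen := rest.take need.toNat with hchosen
      set dropd := rest.drop need.toNat with hdropd
      have htake : hs.take need.toNat = chosen.map (pvKey deg) := by
        rw [hhs, hchosen, List.map_take]
      have hdrop : hs.drop need.toNat = dropd.map (pvKey deg) := by
        rw [hhs, hdropd, List.map_drop]
      have hndr : rest.Nodup := (List.nodup_cons.mp hnd).2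
      have hnd2 : (chosen ++ dropd).Nodup := by
        rw [hchosen, hdropd, List.take_append_drop]; exact hndr
      have hchnd : chosen.Nodup := hnd2.of_append_left
      have hdisj : ∀ q ∈ dropd, q ∉ chosen := by
        intro q hq hq'
        exact List.disjoint_of_nodup_append hnd2 hq' hq
      have hbch : ∀ q ∈ chosen, 0 ≤ q ∧ q < (deg.length : Int) := fun q hq =>
        hbd q (List.mem_cons_of_mem p ((List.take_sublist _ _).subset hq))
      have hbdr : ∀ q ∈ dropd, 0 ≤ q ∧ q < (deg.length : Int) := fun q hq =>
        hbd q (List.mem_cons_of_mem p ((List.drop_sublist _ _).subset hq))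
      set deg' := chosen.foldl (fun d r => pvSetRow d r (PySem.List.pyGetD d r 0 - 1)) deg
        with hdeg'
      have hlen' : deg'.length = deg.length := pvDecFold_length deg chosen
      have hget : ∀ q : Int, 0 ≤ q → PySem.List.pyGetD deg' q 0
          = if q ∈ chosen ∧ q < (deg.length : Int) then PySem.List.pyGetD deg q 0 - 1
            else PySem.List.pyGetD deg q 0 := fun q hq =>
        pvDecFold_getD deg chosen q hchnd (fun r hr => (hbch r hr).1) hq
      have E2 : ∀ q ∈ chosen, pvKey deg' q = ((pvKey deg q).1 + 1, q) := by
        intro q hq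
        have := hget q (hbch q hq).1
        rw [if_pos ⟨hq, (hbch q hq).2⟩] at this
        simp only [pvKey, this]
        rw [Prod.mk.injEq]
        exact ⟨by omega, rfl⟩
      have E1 : ∀ q : Int, 0 ≤ q → q ∉ chosen → pvKey deg' q = pvKey deg q := by
        intro q hq hq'
        have := hget q hq
        rw [if_neg (fun h => hq' h.1)] at this
        simp only [pvKey, this]
        try rfl
      -- the matrix updates agree
      have hmat : (hs.take need.toNat).foldl
            (fun m x => pvSet2 (pvSet2 m p x.2 1) x.2 p 1) mat
          = chosen.foldl (fun m q => pvSet2 (pvSet2 m p q 1) q p 1) mat := by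
        rw [htake, List.foldl_map]
        rfl
      by_cases hc3 : 0 < need ∧
          PySem.List.pyGetD deg (PySem.List.pyGetD rest (need - 1) 0) 0 < 1
      · -- B fails now; A has reinserted a positive key and must fail later
        rw [if_pos (Or.inr (Or.inr hc3))]
        set qlast := PySem.List.pyGetD rest (need - 1) 0 with hqlast
        have hmemch : qlast ∈ chosen := by
          rw [hchosen]; exact pvLast_mem rest need hc3.1 hle
        apply pvOuter_fail
        refine ⟨((pvKey deg qlast).1 + 1, qlast), pvFoldrPush_mem (Or.inl ?_), ?_⟩
        · refine List.mem_filterMap.mpr ⟨pvKey deg qlast, ?_, ?_⟩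
          · rw [htake]; exact List.mem_map_of_mem hmemch
          · rw [if_pos (by simp only [pvKey]; omega)]
            rfl
        · have := hc3.2
          simp only [pvKey]
          omega
      · -- the regular round: both sides continue with matching states
        rw [if_neg (fun h => by
          rcases h with h | h | h
          exacts [hc1 h, hc2 h, hc3 h])]
        -- every selected vertex has degree ≥ 1
        have F1 : ∀ q ∈ chosen, 1 ≤ PySem.List.pyGetD deg q 0 := by
          intro q hq
          rw [hchosen] at hq
          have hpos : 0 < need := by
            have h1 : 0 < (rest.take need.toNat).length := List.length_pos_of_mem hq
            rw [List.length_take] at h1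
            omega
          have hlast : 1 ≤ PySem.List.pyGetD deg (PySem.List.pyGetD rest (need - 1) 0) 0 := by
            rcases not_and_or.mp hc3 with h | h <;> omega
          have := pvTake_min deg rest need hpos hle hrest_sort q hq
          omega
        -- A's reinserted candidates are exactly B's kept vertices, under the new degrees
        have C : (hs.take need.toNat).filterMap
              (fun x => if x.1 + 1 ≠ 0 then some (x.1 + 1, x.2) else none)
            = (chosen.filter (fun q => decide (0 < PySem.List.pyGetD deg' q 0))).map
                (pvKey deg') := by
          rw [htake, List.filterMap_map]
          have haux : ∀ l : List Int, (∀ q ∈ l, q ∈ chosen) →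
              l.filterMap ((fun x : Int × Int =>
                  if x.1 + 1 ≠ 0 then some (x.1 + 1, x.2) else none) ∘ pvKey deg)
                = (l.filter (fun q => decide (0 < PySem.List.pyGetD deg' q 0))).map
                    (pvKey deg') := by
            intro l hl
            induction l with
            | nil => simp
            | cons c cs ihl =>
              have hcch := hl c List.mem_cons_self
              have h1 : 1 ≤ PySem.List.pyGetD deg c 0 := F1 c hcch
              have h2 : PySem.List.pyGetD deg' c 0 = PySem.List.pyGetD deg c 0 - 1 := by
                rw [hget c (hbch c hcch).1, if_pos ⟨hcch, (hbch c hcch).2⟩]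
              by_cases hone : PySem.List.pyGetD deg c 0 = 1
              · rw [List.filterMap_cons_none
                      (by simp only [Function.comp_apply]
                          rw [if_neg (by simp only [pvKey]; omega)]),
                    List.filter_cons_of_neg (by simp only [decide_eq_true_eq]; omega)]
                exact ihl (fun q hq => hl q (List.mem_cons_of_mem c hq))
              · rw [List.filterMap_cons_some
                      (by simp only [Function.comp_apply]
                          rw [if_pos (by simp only [pvKey]; omega)]),
                    List.filter_cons_of_pos (by simp only [decide_eq_true_eq]; omega)]
                rw [List.map_cons, ihl (fun q hq => hl q (List.mem_cons_of_mem c hq))]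
                congr 1
                exact (E2 c hcch).symm
          exact haux chosen (fun q hq => hq)
        set aL := chosen.filter (fun q => decide (0 < PySem.List.pyGetD deg' q 0)) with haL
        have haLsub : ∀ q ∈ aL, q ∈ chosen := fun q hq => List.filter_sublist.subset hq
        have hdropd' : dropd.map (pvKey deg') = dropd.map (pvKey deg) :=
          List.map_congr_left (fun q hq => E1 q (hbdr q hq).1 (hdisj q hq))
        have hchpw : (chosen.map (pvKey deg)).Pairwise pvLe := by
          rw [← htake]
          exact List.Pairwise.sublist (List.take_sublist _ _) hrest_sort
        have hchpw0 : chosen.Pairwise (fun a b => pvLe (pvKey deg' a) (pvKey deg' b)) := by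
          rw [List.pairwise_map] at hchpw
          refine hchpw.imp_of_mem ?_
          intro a b ha hb hab
          rw [E2 a ha, E2 b hb]
          unfold pvLe at hab ⊢
          simp only [pvKey] at hab ⊢
          omega
        have haLpw : (aL.map (pvKey deg')).Pairwise pvLe := by
          rw [List.pairwise_map]
          exact List.Pairwise.sublist List.filter_sublist hchpw0
        have hdrpw : (dropd.map (pvKey deg')).Pairwise pvLe := by
          rw [hdropd', ← hdrop]
          exact List.Pairwise.sublist (List.drop_sublist _ _) hrest_sort
        -- the heap after A's round IS the image of B's merged order under the new key
        have G : ((hs.take need.toNat).filterMap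
              (fun x => if x.1 + 1 ≠ 0 then some (x.1 + 1, x.2) else none)).foldr pvPush
                (hs.drop need.toNat)
            = (pvMerge deg' aL dropd).map (pvKey deg') := by
          refine List.Perm.eq_of_pairwise
            (fun a b _ _ h1 h2 => pvLe_antisymm h1 h2) ?_ ?_ ?_
          · apply pvFoldrPush_sorted
            rw [hdrop, ← hdropd']
            exact hdrpw
          · exact pvMerge_map_sorted deg' aL dropd haLpw hdrpw
          · refine (pvFoldrPush_perm _ _).trans ?_
            rw [C, hdrop, ← hdropd']
            have hp := (pvMerge_perm deg' aL dropd).map (pvKey deg')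
            rw [List.map_append] at hp
            exact hp.symm
        rw [hmat, G]
        -- apply the induction hypothesis to the next round
        have hlenN : (pvMerge deg' aL dropd).length < n := by
          have h1 := (pvMerge_perm deg' aL dropd).length_eq
          rw [List.length_append] at h1
          have h2 : aL.length ≤ chosen.length := by
            rw [haL]; exact List.length_filter_le _ _
          have h3 : chosen.length ≤ rest.length := by
            rw [hchosen, List.length_take]; omega
          have h4 : dropd.length ≤ rest.length := by
            rw [hdropd]; simp
          have h5 : chosen.length + dropd.length = rest.length := by
            rw [hchosen, hdropd, ← List.length_append, List.take_append_drop]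
          rw [← hlen]
          simp only [List.length_cons]
          omega
        refine ih (pvMerge deg' aL dropd).length hlenN _ deg' _ rfl ?_ ?_ ?_
        · rw [List.pairwise_map]
          have := pvMerge_map_sorted deg' aL dropd haLpw hdrpw
          rw [List.pairwise_map] at this
          exact this
        · refine ((pvMerge_perm deg' aL dropd).symm.nodup ?_)
          have : (chosen ++ dropd).Nodup := hnd2
          exact List.Nodup.sublist (List.Sublist.append_right (List.filter_sublist) dropd) this
        · intro q hq
          have hq' : q ∈ aL ++ dropd := (pvMerge_perm deg' aL dropd).subset hq
          rw [hlen']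
          rcases List.mem_append.mp hq' with h' | h'
          · exact hbch q (haLsub q h')
          · exact hbdr q h'

-- ===== VERDICT (by name: the statement is the Claim_ definition above) =====
theorem solve_spec : Claim_equal_solve := by
  unfold Claim_equal_solve
  intro N D _hdom hpre
  unfold Spec_solve
  have hm : PySem.Int.mod D.sum 1 = 0 :=
    (PySem.Int.mod_eq_zero_iff_dvd _ _).mpr (one_dvd _)
  simp only [solve, solve_alt, hm, ne_eq, not_true_eq_false, if_false]
  by_cases hsum : N * (N - 1) < D.sum
  · rw [if_pos hsum, if_pos hsum]
  · rw [if_neg hsum, if_neg hsum]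
    set n := if 0 < N then N else 0 with hn
    have hn0 : 0 ≤ n := by rw [hn]; split <;> omega
    have hnN : n.toNat = N.toNat := by rw [hn]; split <;> omega
    have hND : N ≤ (D.length : Int) := by
      unfold Pre_solve at hpre
      rcases hpre with h | h
      · exact h
      · exact absurd h hsum
    have hpre' : n ≤ (D.length : Int) := by rw [hn]; split <;> omega
    set deg0 := D.take n.toNat with hdeg0
    have hdeglen : deg0.length = n.toNat := by
      rw [hdeg0, List.length_take]; omega
    have hrange : PySem.List.pyRange 0 N 1 = PySem.List.pyRange 0 n 1 := by
      rw [hn]; split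
      · rfl
      · rw [PySem.List.pyRange_one_eq_nil (by omega), PySem.List.pyRange_one_eq_nil (by omega)]
    have hpairs : (PySem.List.pyRange 0 N 1).map (fun i => (-(PySem.List.pyGetD D i 0), i))
        = (PySem.List.pyRange 0 n 1).map (pvKey deg0) := by
      rw [hrange]
      refine List.map_congr_left ?_
      intro i hi
      rcases PySem.List.mem_pyRange_one.mp hi with ⟨hi0, hin⟩
      have hiD : i < (D.length : Int) := by omega
      have hid : PySem.List.pyGetD deg0 i 0 = PySem.List.pyGetD D i 0 := by
        rw [PySem.List.pyGetD_eq_getElem D 0 hi0 hiD,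
            PySem.List.pyGetD_eq_getElem deg0 0 hi0 (by rw [hdeglen]; omega)]
        simp only [hdeg0]
        exact List.getElem_take
      rw [pvKey, hid]
    have hperm : (PySem.List.sorted (PySem.List.pyRange 0 n 1)
        (fun i => -(PySem.List.pyGetD deg0 i 0)) false).Perm (PySem.List.pyRange 0 n 1) :=
      PySem.List.sorted_perm _ _ _
    set order0 := PySem.List.sorted (PySem.List.pyRange 0 n 1)
      (fun i => -(PySem.List.pyGetD deg0 i 0)) false with horder0
    have hsorted : (order0.map (pvKey deg0)).Pairwise pvLe := by
      rw [List.pairwise_map]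
      have := pvSorted_pairwise_lex (fun i => -(PySem.List.pyGetD deg0 i 0))
        (PySem.List.pyRange 0 n 1) (PySem.List.pairwise_lt_pyRange_one 0 n)
      rw [← horder0] at this
      exact this
    have hheap : pvHeapify ((PySem.List.pyRange 0 N 1).map
          (fun i => (-(PySem.List.pyGetD D i 0), i)))
        = order0.map (pvKey deg0) := by
      refine List.Perm.eq_of_pairwise (fun a b _ _ h1 h2 => pvLe_antisymm h1 h2)
        (pvFoldrPush_sorted List.Pairwise.nil) hsorted ?_
      rw [pvHeapify, hpairs]
      refine (pvFoldrPush_perm _ []).trans ?_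
      rw [List.append_nil]
      exact (hperm.map (pvKey deg0)).symm
    rw [hheap]
    have hmatrix : List.replicate N.toNat (List.replicate N.toNat (0 : Int))
        = List.replicate n.toNat (List.replicate n.toNat (0 : Int)) := by rw [hnN]
    rw [hmatrix]
    refine pvMain order0.length order0 deg0 _ rfl hsorted ?_ ?_
    · exact hperm.symm.nodup (PySem.List.nodup_pyRange_one 0 n)
    · intro q hq
      rcases PySem.List.mem_pyRange_one.mp (hperm.subset hq) with ⟨h1, h2⟩
      rw [hdeglen]
      omega
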